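-- pv_equiv track=rewrite | github.com/pc5401/my_BOJ | 백준/Bronze/10675. Cow Routing/Cow Routing.py | solve
-- ===== SOURCE A (Python) =====
-- def solve(A: int, B: int, N: int, routes: list[tuple[int, list[int]]]) -> int:
--     result = None
--     # 각 항공 경로를 확인
--     for cost, cities in routes:
--         try:
--             idxA = cities.index(A)
--         except ValueError:
--             continue
--         try:
--             idxB = cities.index(B)
--         except ValueError:
--             continue
--         # A가 B보다 앞에 있어야 함
--         if idxA < idxB:
--             if result is None or cost < result:
--                 result = cost
--     return result if result is not None else -1
-- ===== SOURCE B (Python) =====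
-- def solve(A: int, B: int, N: int, routes: list[tuple[int, list[int]]]) -> int:
--     # Examine routes in ascending cost order and return the first qualifying
--     # cost (early exit): that is the minimum qualifying cost.  A route
--     # qualifies iff both cities appear and the first occurrence of A precedes
--     # the first occurrence of B; first occurrences come from a dict built in
--     # one pass, replacing the two .index() scans.
--     for cost, cities in sorted(routes, key=lambda r: r[0]):
--         first = {}
--         for i, c in enumerate(cities):
--             first.setdefault(c, i)
--         if A in first and B in first and first[A] < first[B]:
--             return cost
--     return -1
-- ===== Notes on version B (the rewrite author's own statement) =====
-- stated objective: alternative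
-- what changed: Instead of scanning all routes with two .index() calls each and a running min-with-None sentinel, B sorts the routes by cost and returns the cost of the first qualifying route (early exit), deciding qualification from a first-occurrence-index dict built in a single pass over the cities.
import Mathlib
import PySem

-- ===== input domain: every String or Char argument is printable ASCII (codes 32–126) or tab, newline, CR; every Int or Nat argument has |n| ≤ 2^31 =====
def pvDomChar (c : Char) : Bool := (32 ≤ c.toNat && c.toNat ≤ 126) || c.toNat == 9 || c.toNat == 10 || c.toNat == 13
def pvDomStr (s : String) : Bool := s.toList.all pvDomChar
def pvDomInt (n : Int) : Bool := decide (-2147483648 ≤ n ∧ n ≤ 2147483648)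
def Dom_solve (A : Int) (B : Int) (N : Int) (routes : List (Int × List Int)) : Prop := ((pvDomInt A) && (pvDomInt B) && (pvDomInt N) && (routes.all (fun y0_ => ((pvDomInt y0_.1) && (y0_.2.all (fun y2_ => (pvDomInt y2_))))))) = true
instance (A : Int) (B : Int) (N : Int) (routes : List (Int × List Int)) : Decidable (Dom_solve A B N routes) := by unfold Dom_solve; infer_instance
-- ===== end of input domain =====

-- B sorts the routes by cost and returns the first qualifying route's cost (early
-- exit), deciding qualification from a first-occurrence dict built in one pass;
-- objective: alternative (same value, not claimed faster).

-- ===== PORT A =====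
def solveStep (A B : Int) (result : Option Int) (p : Int × List Int) : Option Int :=
  match PySem.List.index? p.2 A with
  | none => result
  | some idxA =>
    match PySem.List.index? p.2 B with
    | none => result
    | some idxB =>
      if idxA < idxB then
        match result with
        | none => some p.1
        | some r => if p.1 < r then some p.1 else some r
      else result

def solve (A : Int) (B : Int) (N : Int) (routes : List (Int × List Int)) : Int :=
  match routes.foldl (solveStep A B) none with
  | some r => r
  | none => -1

-- ===== PORT B =====
-- first-occurrence index of each city, built by one pass of setdefault
def firstIdx (cities : List Int) : PySem.Dict Int Int :=
  (PySem.List.enumerate cities).foldl (fun d p => PySem.Dict.setdefault d p.2 p.1) PySem.Dict.empty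

def okFirst (A B : Int) (cities : List Int) : Bool :=
  let first := firstIdx cities
  first.contains A && first.contains B && decide (first.getD A 0 < first.getD B 0)

-- the for-loop with early return over the cost-sorted routes
def findRoute (A B : Int) : List (Int × List Int) → Int
  | [] => -1
  | (cost, cities) :: rest => if okFirst A B cities then cost else findRoute A B rest

def solve_alt (A : Int) (B : Int) (N : Int) (routes : List (Int × List Int)) : Int :=
  findRoute A B (PySem.List.sorted routes (fun r => r.1) false)

-- ===== PRECONDITION & SPEC =====
def Spec_solve (A : Int) (B : Int) (N : Int) (routes : List (Int × List Int)) (out : Int) : Prop := out = solve_alt A B N routes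
instance (A : Int) (B : Int) (N : Int) (routes : List (Int × List Int)) (out : Int) : Decidable (Spec_solve A B N routes out) := by unfold Spec_solve; infer_instance

-- ===== CLAIM =====
def Claim_equal_solve : Prop := ∀ (A : Int) (B : Int) (N : Int) (routes : List (Int × List Int)), Dom_solve A B N routes → Spec_solve A B N routes (solve A B N routes)

-- ===== LEMMAS AND PROOFS =====

-- the setdefault loop records the first index of every element
lemma firstFold_get? (l : List Int) : ∀ (s : Int) (d : PySem.Dict Int Int) (x : Int),
    ((PySem.List.enumerate l s).foldl (fun d p => PySem.Dict.setdefault d p.2 p.1) d).get? x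
      = ((d.get? x).or ((PySem.List.index? l x).map (fun k => s + (k : Int)))) := by
  induction l with
  | nil =>
    intro s d x
    simp [PySem.List.enumerate_nil, PySem.List.index?]
  | cons c t ih =>
    intro s d x
    rw [PySem.List.enumerate_cons]
    simp only [List.foldl_cons]
    rw [ih]
    by_cases hx : x = c
    · subst hx
      rw [PySem.List.index?_cons_self]
      rcases hd : d.get? x with _ | v
      · have hc : d.contains x = false := by
          rw [PySem.Dict.contains_eq_isSome_get?, hd]; rfl
        rw [PySem.Dict.setdefault_of_not_contains _ _ hc,
            PySem.Dict.get?_insert_self]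
        have hxmem : PySem.List.index? t x = none ∨ ∃ k, PySem.List.index? t x = some k := by
          cases PySem.List.index? t x with
          | none => exact Or.inl rfl
          | some k => exact Or.inr ⟨k, rfl⟩
        rcases hxmem with h | ⟨k, h⟩ <;> simp [Option.or]
      · have hc : d.contains x = true := by
          rw [PySem.Dict.contains_eq_isSome_get?, hd]; rfl
        rw [PySem.Dict.setdefault_of_contains _ _ hc, hd]
        simp [Option.or]
    · rw [PySem.Dict.get?_setdefault_of_ne _ _ hx,
          PySem.List.index?_cons_of_ne _ (fun h => hx h.symm)]
      cases PySem.List.index? t x with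
      | none => rfl
      | some k =>
        have hk : (s + 1 + (k : Int)) = s + ((k + 1 : Nat) : Int) := by push_cast; ring
        simp [hk]

lemma firstIdx_get? (cities : List Int) (x : Int) :
    (firstIdx cities).get? x = (PySem.List.index? cities x).map (fun k => (k : Int)) := by
  unfold firstIdx
  rw [firstFold_get? cities 0 PySem.Dict.empty x]
  simp [PySem.Dict.get?_empty, Option.or]

-- qualification in B agrees with A's index comparison
lemma okFirst_eq (A B : Int) (cities : List Int) :
    okFirst A B cities =
      (match PySem.List.index? cities A, PySem.List.index? cities B with
       | some a, some b => decide (a < b)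
       | _, _ => false) := by
  unfold okFirst
  simp only [PySem.Dict.contains_eq_isSome_get?, PySem.Dict.getD_eq_get?_getD,
    firstIdx_get?]
  cases hA : PySem.List.index? cities A with
  | none => simp
  | some a =>
    cases hB : PySem.List.index? cities B with
    | none => simp
    | some b => simp

-- A's step, phrased through okFirst
lemma step_char (A B : Int) (r : Option Int) (cost : Int) (cities : List Int) :
    solveStep A B r (cost, cities) =
      if okFirst A B cities then
        some (match r with | none => cost | some v => min cost v)
      else r := by
  rw [okFirst_eq]
  unfold solveStep
  cases hA : PySem.List.index? cities A with
  | none => rfl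
  | some a =>
    cases hB : PySem.List.index? cities B with
    | none => rfl
    | some b =>
      by_cases hlt : a < b
      · simp only [hlt, decide_true, if_true]
        cases r with
        | none => rfl
        | some v =>
          by_cases hc : cost < v
          · simp [hc, le_of_lt hc]
          · simp only [if_neg hc]
            have : min cost v = v := by omega
            simp [this]
      · simp [hlt]

-- A's fold is the min-fold over the costs of the qualifying routes
lemma fold_char (A B : Int) (routes : List (Int × List Int)) : ∀ (acc : Option Int),
    routes.foldl (solveStep A B) acc =
      ((routes.filter (fun p => okFirst A B p.2)).map (fun p => p.1)).foldl
        (fun a c => some (match a with | none => c | some v => min c v)) acc := by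
  induction routes with
  | nil => intro acc; rfl
  | cons p rest ih =>
    intro acc
    obtain ⟨cost, cities⟩ := p
    by_cases h : okFirst A B cities = true
    · simp only [List.foldl_cons, List.filter_cons, h, if_true, List.map_cons, step_char]
      rw [ih]
    · simp only [List.foldl_cons, List.filter_cons, h, Bool.false_eq_true, if_false, step_char]
      rw [ih]

lemma mfold_some (xs : List Int) : ∀ (v : Int),
    xs.foldl (fun a c => some (match a with | none => c | some w => min c w)) (some v) =
      some (xs.foldl min v) := by
  induction xs with
  | nil => intro v; rfl
  | cons x t ih =>
    intro v
    simp only [List.foldl_cons]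
    rw [ih, min_comm]

-- B's loop returns the cost of the first qualifying route
lemma findRoute_eq (A B : Int) (l : List (Int × List Int)) :
    findRoute A B l =
      match l.filter (fun p => okFirst A B p.2) with
      | [] => -1
      | p :: _ => p.1 := by
  induction l with
  | nil => rfl
  | cons p rest ih =>
    obtain ⟨cost, cities⟩ := p
    by_cases h : okFirst A B cities = true
    · simp [findRoute, h]
    · simp only [findRoute, h, Bool.false_eq_true, if_false, List.filter_cons]
      simpa [h] using ih

theorem solve_eq (A B N : Int) (routes : List (Int × List Int)) :
    solve A B N routes = solve_alt A B N routes := by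
  unfold solve solve_alt
  rw [fold_char, findRoute_eq]
  set S := PySem.List.sorted routes (fun r => r.1) false with hS
  have hperm : (routes.filter (fun p => okFirst A B p.2)).Perm
      (S.filter (fun p => okFirst A B p.2)) :=
    ((PySem.List.sorted_perm routes (fun r => r.1) false).filter _).symm
  cases hF : routes.filter (fun p => okFirst A B p.2) with
  | nil =>
    have hFS : S.filter (fun p => okFirst A B p.2) = [] := by
      rw [hF] at hperm
      exact hperm.symm.eq_nil
    simp [hFS]
  | cons y ty =>
    cases hFS : S.filter (fun p => okFirst A B p.2) with
    | nil =>
      rw [hF, hFS] at hperm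
      exact absurd hperm.eq_nil (by simp)
    | cons q tq =>
      simp only [List.map_cons, List.foldl_cons, mfold_some]
      rw [hF, hFS] at hperm
      have hcperm : ((y.1 :: ty.map (fun p => p.1))).Perm (q.1 :: tq.map (fun p => p.1)) := by
        simpa using hperm.map (fun p => p.1)
      set m := (ty.map (fun p => p.1)).foldl min y.1 with hm
      have hmmem : m ∈ y.1 :: ty.map (fun p => p.1) := by
        rcases PySem.List.foldl_min_mem (ty.map (fun p => p.1)) y.1 with h | h
        · simp [hm, h]
        · simp [hm, h]
      have hmle : ∀ z ∈ y.1 :: ty.map (fun p => p.1), m ≤ z := by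
        intro z hz
        rcases List.mem_cons.mp hz with h | hz
        · exact h ▸ (PySem.List.foldl_min_le (ty.map (fun p => p.1)) y.1).1
        · exact (PySem.List.foldl_min_le (ty.map (fun p => p.1)) y.1).2 z hz
      have hpw : (q :: tq).Pairwise (fun a b : Int × List Int => a.1 ≤ b.1) := by
        have hs : S.Pairwise (fun a b : Int × List Int => a.1 ≤ b.1) :=
          PySem.List.sorted_pairwise routes (fun r => r.1)
        have := hs.filter (fun p => okFirst A B p.2)
        rwa [hFS] at this
      have hqle : ∀ z ∈ q.1 :: tq.map (fun p => p.1), q.1 ≤ z := by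
        intro z hz
        rcases List.mem_cons.mp hz with h | hz
        · exact h ▸ le_rfl
        · rcases List.mem_map.mp hz with ⟨p, hp, rfl⟩
          exact (List.pairwise_cons.mp hpw).1 p hp
      have h1 : m ≤ q.1 := hmle _ (hcperm.mem_iff.mpr (by simp))
      have h2 : q.1 ≤ m := hqle _ (hcperm.mem_iff.mp hmmem)
      omega

-- ===== VERDICT =====
theorem solve_spec : Claim_equal_solve := by
  intro A B N routes _
  unfold Spec_solve
  exact solve_eq A B N routes
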